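-- pv_equiv track=rewrite | github.com/shadow-warrior123/quantity-estimator | New folder (6)/CostPredictor/frames/excel_processing_frame.py | categorize_sheets
-- ===== SOURCE A (Python) =====
-- def categorize_sheets(sheet_names):
--     categories = {
--         'Structural Columns': [],
--         'Walls': [],
--         'Floors': [],
--         'Doors': [],
--         'Railings': [],
--         'Ceilings': [],
--         'Structural Framing': [],
--         'Structural Foundations': [],
--         'Stairs': []
--     }
--
--     for sheet in sheet_names:
--         for category in categories.keys():
--             if category.lower() in sheet.lower():
--                 categories[category].append(sheet)
--                 break
--
--     return categories
-- ===== SOURCE B (Python) =====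
-- CATEGORIES = ['Structural Columns', 'Walls', 'Floors', 'Doors', 'Railings',
--               'Ceilings', 'Structural Framing', 'Structural Foundations', 'Stairs']
--
--
-- def _first_category(sheet):
--     """Index-free first matching category of one sheet, or None."""
--     low = sheet.lower()
--     return next((c for c in CATEGORIES if c.lower() in low), None)
--
--
-- def categorize_sheets(sheet_names):
--     # one pass computing each sheet's first matching category, then a
--     # per-category filter (category-outer decomposition, no dict mutation)
--     first = [_first_category(s) for s in sheet_names]
--     return {c: [s for s, f in zip(sheet_names, first) if f == c]
--             for c in CATEGORIES}
-- ===== Notes on version B (the rewrite author's own statement) =====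
-- stated objective: alternative
-- what changed: Instead of A's per-sheet dispatch that mutates a dict of buckets via an inner category scan with break, B computes each sheet's first matching category once and builds the result as a per-category filter over the sheet list (category-outer decomposition, no mutation).
import Mathlib
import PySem

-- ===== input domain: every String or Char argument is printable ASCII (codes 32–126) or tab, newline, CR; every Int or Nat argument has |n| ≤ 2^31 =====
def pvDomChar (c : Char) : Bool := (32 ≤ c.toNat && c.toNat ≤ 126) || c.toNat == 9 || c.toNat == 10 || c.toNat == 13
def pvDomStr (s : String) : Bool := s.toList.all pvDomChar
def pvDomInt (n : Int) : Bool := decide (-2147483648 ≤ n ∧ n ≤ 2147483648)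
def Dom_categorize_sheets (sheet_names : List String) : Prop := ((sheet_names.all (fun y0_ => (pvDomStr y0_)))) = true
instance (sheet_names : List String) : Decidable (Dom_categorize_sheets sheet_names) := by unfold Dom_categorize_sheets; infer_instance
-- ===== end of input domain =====

-- B replaces A's per-sheet dispatch into a mutated dict by computing each sheet's first
-- matching category once and building each bucket as a per-category filter (objective: alternative).

-- ===== PORT A =====
-- the dict literal of nine empty buckets
def pvInitDict : PySem.Dict String (List String) :=
  (((((((((PySem.Dict.empty.insert "Structural Columns" []).insert "Walls" []).insert "Floors" []).insert "Doors" []).insert "Railings" []).insert "Ceilings" []).insert "Structural Framing" []).insert "Structural Foundations" []).insert "Stairs" [])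

-- A's inner 'for category in categories.keys(): … break' loop
def pvInner (sheet : String) : List String → PySem.Dict String (List String) → PySem.Dict String (List String)
  | [], d => d
  | c :: rest, d =>
    if PySem.Str.isIn (PySem.Str.lower c) (PySem.Str.lower sheet) then
      d.modify c [] (fun l => l ++ [sheet])   -- categories[category].append(sheet); the key is always present
    else
      pvInner sheet rest d

def categorize_sheets (sheet_names : List String) : List (String × List String) :=
  (sheet_names.foldl (fun d sheet => pvInner sheet d.keys d) pvInitDict).items

-- ===== PORT B =====
def pvCatList : List String := ["Structural Columns", "Walls", "Floors", "Doors", "Railings", "Ceilings", "Structural Framing", "Structural Foundations", "Stairs"]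

-- _first_category: first category whose lowercase form is a substring of the lowered sheet
def pvFirstCat (sheet : String) : Option String :=
  pvCatList.find? (fun c => PySem.Str.isIn (PySem.Str.lower c) (PySem.Str.lower sheet))

def categorize_sheets_alt (sheet_names : List String) : List (String × List String) :=
  pvCatList.map (fun c => (c, sheet_names.filter (fun s => pvFirstCat s == some c)))

-- ===== PRECONDITION & SPEC =====
def Spec_categorize_sheets (sheet_names : List String) (out : List (String × List String)) : Prop := out = categorize_sheets_alt sheet_names
instance (sheet_names : List String) (out : List (String × List String)) : Decidable (Spec_categorize_sheets sheet_names out) := by unfold Spec_categorize_sheets; infer_instance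

-- ===== CLAIM (what is proved, stated in full; the proofs are below) =====
def Claim_equal_categorize_sheets : Prop := ∀ (sheet_names : List String), Dom_categorize_sheets sheet_names → Spec_categorize_sheets sheet_names (categorize_sheets sheet_names)

-- ===== LEMMAS AND PROOFS =====
-- the one-sheet contribution to a bucket, and a whole bucket
def pvSel (c : String) (s : String) : List String :=
  if pvFirstCat s == some c then [s] else []

def pvBucket (c : String) (l : List String) : List String :=
  l.filter (fun s => pvFirstCat s == some c)

lemma pvBucket_cons (c : String) (s : String) (l : List String) :
    pvBucket c (s :: l) = pvSel c s ++ pvBucket c l := by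
  by_cases h : pvFirstCat s == some c <;> simp [pvBucket, pvSel, List.filter, h]

-- one step of A's outer loop on an invariant-shaped state appends each sheet's selection to its bucket
lemma pvStep (s : String) (g1 g2 g3 g4 g5 g6 g7 g8 g9 : List String) :
    pvInner s (PySem.Dict.keys (PySem.Dict.mk [("Structural Columns", g1), ("Walls", g2), ("Floors", g3), ("Doors", g4), ("Railings", g5), ("Ceilings", g6), ("Structural Framing", g7), ("Structural Foundations", g8), ("Stairs", g9)])) (PySem.Dict.mk [("Structural Columns", g1), ("Walls", g2), ("Floors", g3), ("Doors", g4), ("Railings", g5), ("Ceilings", g6), ("Structural Framing", g7), ("Structural Foundations", g8), ("Stairs", g9)])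
      = PySem.Dict.mk [("Structural Columns", g1 ++ pvSel "Structural Columns" s), ("Walls", g2 ++ pvSel "Walls" s), ("Floors", g3 ++ pvSel "Floors" s), ("Doors", g4 ++ pvSel "Doors" s), ("Railings", g5 ++ pvSel "Railings" s), ("Ceilings", g6 ++ pvSel "Ceilings" s), ("Structural Framing", g7 ++ pvSel "Structural Framing" s), ("Structural Foundations", g8 ++ pvSel "Structural Foundations" s), ("Stairs", g9 ++ pvSel "Stairs" s)] := by
  have hk : PySem.Dict.keys (PySem.Dict.mk [("Structural Columns", g1), ("Walls", g2), ("Floors", g3), ("Doors", g4), ("Railings", g5), ("Ceilings", g6), ("Structural Framing", g7), ("Structural Foundations", g8), ("Stairs", g9)]) = pvCatList := rfl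
  rw [hk]; rw [show pvCatList = ["Structural Columns", "Walls", "Floors", "Doors", "Railings", "Ceilings", "Structural Framing", "Structural Foundations", "Stairs"] from rfl]
  by_cases h1 : PySem.Str.isIn (PySem.Str.lower "Structural Columns") (PySem.Str.lower s) = true
  · have hfc : pvFirstCat s = some "Structural Columns" := by
      simp only [pvFirstCat, pvCatList, List.find?, h1]
    simp only [pvInner, h1, if_true, pvSel, hfc]
    simp [PySem.Dict.modify]
    rfl
  · -- Structural Columns does not match
    by_cases h2 : PySem.Str.isIn (PySem.Str.lower "Walls") (PySem.Str.lower s) = true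
    · have hfc : pvFirstCat s = some "Walls" := by
        simp only [pvFirstCat, pvCatList, List.find?, h1, h2]
      simp only [pvInner, h1, h2, if_true, if_false, Bool.false_eq_true, pvSel, hfc]
      simp [PySem.Dict.modify]
      rfl
    · -- Walls does not match
      by_cases h3 : PySem.Str.isIn (PySem.Str.lower "Floors") (PySem.Str.lower s) = true
      · have hfc : pvFirstCat s = some "Floors" := by
          simp only [pvFirstCat, pvCatList, List.find?, h1, h2, h3]
        simp only [pvInner, h1, h2, h3, if_true, if_false, Bool.false_eq_true, pvSel, hfc]
        simp [PySem.Dict.modify]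
        rfl
      · -- Floors does not match
        by_cases h4 : PySem.Str.isIn (PySem.Str.lower "Doors") (PySem.Str.lower s) = true
        · have hfc : pvFirstCat s = some "Doors" := by
            simp only [pvFirstCat, pvCatList, List.find?, h1, h2, h3, h4]
          simp only [pvInner, h1, h2, h3, h4, if_true, if_false, Bool.false_eq_true, pvSel, hfc]
          simp [PySem.Dict.modify]
          rfl
        · -- Doors does not match
          by_cases h5 : PySem.Str.isIn (PySem.Str.lower "Railings") (PySem.Str.lower s) = true
          · have hfc : pvFirstCat s = some "Railings" := by
              simp only [pvFirstCat, pvCatList, List.find?, h1, h2, h3, h4, h5]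
            simp only [pvInner, h1, h2, h3, h4, h5, if_true, if_false, Bool.false_eq_true, pvSel, hfc]
            simp [PySem.Dict.modify]
            rfl
          · -- Railings does not match
            by_cases h6 : PySem.Str.isIn (PySem.Str.lower "Ceilings") (PySem.Str.lower s) = true
            · have hfc : pvFirstCat s = some "Ceilings" := by
                simp only [pvFirstCat, pvCatList, List.find?, h1, h2, h3, h4, h5, h6]
              simp only [pvInner, h1, h2, h3, h4, h5, h6, if_true, if_false, Bool.false_eq_true, pvSel, hfc]
              simp [PySem.Dict.modify]
              rfl
            · -- Ceilings does not match
              by_cases h7 : PySem.Str.isIn (PySem.Str.lower "Structural Framing") (PySem.Str.lower s) = true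
              · have hfc : pvFirstCat s = some "Structural Framing" := by
                  simp only [pvFirstCat, pvCatList, List.find?, h1, h2, h3, h4, h5, h6, h7]
                simp only [pvInner, h1, h2, h3, h4, h5, h6, h7, if_true, if_false, Bool.false_eq_true, pvSel, hfc]
                simp [PySem.Dict.modify]
                rfl
              · -- Structural Framing does not match
                by_cases h8 : PySem.Str.isIn (PySem.Str.lower "Structural Foundations") (PySem.Str.lower s) = true
                · have hfc : pvFirstCat s = some "Structural Foundations" := by
                    simp only [pvFirstCat, pvCatList, List.find?, h1, h2, h3, h4, h5, h6, h7, h8]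
                  simp only [pvInner, h1, h2, h3, h4, h5, h6, h7, h8, if_true, if_false, Bool.false_eq_true, pvSel, hfc]
                  simp [PySem.Dict.modify]
                  rfl
                · -- Structural Foundations does not match
                  by_cases h9 : PySem.Str.isIn (PySem.Str.lower "Stairs") (PySem.Str.lower s) = true
                  · have hfc : pvFirstCat s = some "Stairs" := by
                      simp only [pvFirstCat, pvCatList, List.find?, h1, h2, h3, h4, h5, h6, h7, h8, h9]
                    simp only [pvInner, h1, h2, h3, h4, h5, h6, h7, h8, h9, if_true, if_false, Bool.false_eq_true, pvSel, hfc]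
                    simp [PySem.Dict.modify]
                    rfl
                  · have hfc : pvFirstCat s = none := by
                      simp only [pvFirstCat, pvCatList, List.find?, h1, h2, h3, h4, h5, h6, h7, h8, h9]
                    simp only [pvInner, h1, h2, h3, h4, h5, h6, h7, h8, h9, if_false, Bool.false_eq_true, pvSel, hfc]
                    simp

-- A's whole fold from any invariant-shaped state
lemma pvMain (l : List String) : ∀ (g1 g2 g3 g4 g5 g6 g7 g8 g9 : List String),
    l.foldl (fun d sheet => pvInner sheet d.keys d) (PySem.Dict.mk [("Structural Columns", g1), ("Walls", g2), ("Floors", g3), ("Doors", g4), ("Railings", g5), ("Ceilings", g6), ("Structural Framing", g7), ("Structural Foundations", g8), ("Stairs", g9)])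
      = PySem.Dict.mk [("Structural Columns", g1 ++ pvBucket "Structural Columns" l), ("Walls", g2 ++ pvBucket "Walls" l), ("Floors", g3 ++ pvBucket "Floors" l), ("Doors", g4 ++ pvBucket "Doors" l), ("Railings", g5 ++ pvBucket "Railings" l), ("Ceilings", g6 ++ pvBucket "Ceilings" l), ("Structural Framing", g7 ++ pvBucket "Structural Framing" l), ("Structural Foundations", g8 ++ pvBucket "Structural Foundations" l), ("Stairs", g9 ++ pvBucket "Stairs" l)] := by
  induction l with
  | nil => intro g1 g2 g3 g4 g5 g6 g7 g8 g9; simp [pvBucket]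
  | cons s t ih =>
      intro g1 g2 g3 g4 g5 g6 g7 g8 g9
      rw [List.foldl_cons, pvStep, ih]
      simp only [pvBucket_cons, List.append_assoc]

-- ===== VERDICT (by name: the statement is the Claim_ definition above) =====
theorem categorize_sheets_spec : Claim_equal_categorize_sheets := by
  intro sheet_names _
  show categorize_sheets sheet_names = categorize_sheets_alt sheet_names
  have h0 : pvInitDict = PySem.Dict.mk [("Structural Columns", ([] : List String)), ("Walls", ([] : List String)), ("Floors", ([] : List String)), ("Doors", ([] : List String)), ("Railings", ([] : List String)), ("Ceilings", ([] : List String)), ("Structural Framing", ([] : List String)), ("Structural Foundations", ([] : List String)), ("Stairs", ([] : List String))] := rfl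
  rw [categorize_sheets, h0, pvMain]
  simp only [categorize_sheets_alt, pvCatList, List.map, List.nil_append]
  rfl
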